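-- pv_equiv track=rewrite | github.com/MikhailNorkin/Sem5Dom | Sem5DomTask3.py | swape_number_languges
-- ===== SOURCE A (Python) =====
-- def swape_number_languges(num_lan):
--     filtered_list = []
--     sum_ord = 0
--     for num,lan in num_lan:
--         for l in lan:
--             sum_ord+=ord(l)
--         if sum_ord % num == 0:
--             filtered_list.append((sum_ord,lan))
--     return filtered_list
-- ===== SOURCE B (Python) =====
-- def swape_number_languges(num_lan):
--     # Recursive decomposition: result for suffix starting at i given cumulative sum acc,
--     # built back-to-front by prepending to the recursive result.
--     def go(i, acc):
--         if i == len(num_lan):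
--             return []
--         num, lan = num_lan[i]
--         c = acc
--         for ch in lan:
--             c += ord(ch)
--         if c % num == 0:
--             return [(c, lan)] + go(i + 1, c)
--         return go(i + 1, c)
--     return go(0, 0)
-- ===== Notes on version B (the rewrite author's own statement) =====
-- stated objective: alternative
-- what changed: Replaces A's iterative loop that appends to a growing accumulator list with a recursive function on the suffix of the list that threads the cumulative ord-sum downward and builds the result back-to-front by prepending to the recursive call's result.
import Mathlib
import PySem

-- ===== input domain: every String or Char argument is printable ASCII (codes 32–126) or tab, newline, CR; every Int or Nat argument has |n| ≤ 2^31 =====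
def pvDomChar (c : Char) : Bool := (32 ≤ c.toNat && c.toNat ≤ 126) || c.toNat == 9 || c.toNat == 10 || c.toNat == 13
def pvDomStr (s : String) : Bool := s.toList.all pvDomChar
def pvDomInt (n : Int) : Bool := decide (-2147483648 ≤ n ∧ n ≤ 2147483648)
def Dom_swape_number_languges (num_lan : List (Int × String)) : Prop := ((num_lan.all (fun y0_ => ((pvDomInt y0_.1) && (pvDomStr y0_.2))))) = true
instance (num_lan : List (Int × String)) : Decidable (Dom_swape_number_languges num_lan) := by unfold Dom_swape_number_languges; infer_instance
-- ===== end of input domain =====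

-- B replaces A's iterative append-accumulating loop with a recursion over the list suffix that threads the cumulative ord-sum and builds the result back-to-front by consing (alternative decomposition, same cost).


-- ===== PORT A =====
-- One fused loop: state = (filtered_list, sum_ord); inner char loop adds ords into sum_ord.
def swape_number_languges (num_lan : List (Int × String)) : List (Int × String) :=
  (num_lan.foldl
    (fun (st : List (Int × String) × Int) p =>
      let s := p.2.toList.foldl (fun a c => a + (c.toNat : Int)) st.2
      if PySem.Int.mod s p.1 = 0 then (st.1 ++ [(s, p.2)], s) else (st.1, s))
    ([], 0)).1

-- ===== PORT B =====
-- B: recursion on the suffix, cumulative sum threaded down, result consed back-to-front.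
def pvGo (acc : Int) : List (Int × String) → List (Int × String)
  | [] => []
  | (num, lan) :: rest =>
    let c := lan.toList.foldl (fun a ch => a + (ch.toNat : Int)) acc
    if PySem.Int.mod c num = 0 then (c, lan) :: pvGo c rest else pvGo c rest

def swape_number_languges_alt (num_lan : List (Int × String)) : List (Int × String) :=
  pvGo 0 num_lan

-- ===== PRECONDITION & SPEC =====
-- Pre_ excludes inputs containing a pair with num = 0: there Python A (and B) raise ZeroDivisionError.
def Pre_swape_number_languges (num_lan : List (Int × String)) : Prop :=
  ∀ p ∈ num_lan, p.1 ≠ 0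
instance (num_lan : List (Int × String)) : Decidable (Pre_swape_number_languges num_lan) := by
  unfold Pre_swape_number_languges; infer_instance
def pvWitness_swape_number_languges : (List (Int × String)) := [(2, "ab"), (-3, "x")]
def Spec_swape_number_languges (num_lan : List (Int × String)) (out : List (Int × String)) : Prop := out = swape_number_languges_alt num_lan
instance (num_lan : List (Int × String)) (out : List (Int × String)) : Decidable (Spec_swape_number_languges num_lan out) := by unfold Spec_swape_number_languges; infer_instance

-- ===== CLAIM (what is proved, stated in full; the proofs are below) =====
def Claim_equal_swape_number_languges : Prop := ∀ (num_lan : List (Int × String)), Dom_swape_number_languges num_lan → Pre_swape_number_languges num_lan → Spec_swape_number_languges num_lan (swape_number_languges num_lan)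

-- ===== LEMMAS AND PROOFS =====

-- loop invariant: A's fold from state (fl, acc) produces fl ++ B's recursion from cumulative base acc
theorem pv_main (l : List (Int × String)) (fl : List (Int × String)) (acc : Int) :
    (l.foldl
      (fun (st : List (Int × String) × Int) p =>
        let s := p.2.toList.foldl (fun a c => a + (c.toNat : Int)) st.2
        if PySem.Int.mod s p.1 = 0 then (st.1 ++ [(s, p.2)], s) else (st.1, s))
      (fl, acc)).1
    = fl ++ pvGo acc l := by
  induction l generalizing fl acc with
  | nil => simp [pvGo]
  | cons p l ih =>
    obtain ⟨num, lan⟩ := p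
    rw [List.foldl_cons]
    dsimp only
    by_cases h : PySem.Int.mod (lan.toList.foldl (fun a c => a + (c.toNat : Int)) acc) num = 0
    · rw [if_pos h, ih]
      simp [pvGo, h]
    · rw [if_neg h, ih]
      simp [pvGo, h]

-- ===== VERDICT (by name: the statement is the Claim_ definition above) =====
theorem swape_number_languges_spec : Claim_equal_swape_number_languges := by
  intro num_lan _ _
  unfold Spec_swape_number_languges swape_number_languges swape_number_languges_alt
  simpa using pv_main num_lan [] 0
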